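-- pv_equiv track=rewrite | github.com/NoisNette/Codesignal-solutions | superResources.py | superResources
-- ===== SOURCE A (Python) =====
-- def superResources(requests):
--
--     def le(a, b):
--         return int(a) <= int(b)
--
--     if len(requests) < 2:
--         return requests
--     parts = [
--             requests[0 : len(requests) // 2],
--             requests[len(requests) // 2 : len(requests)]
--     ]
--     parts[0] = superResources(parts[0])
--     parts[1] = superResources(parts[1])
--
--     result = []
--     idx = [0, 0]
--     length = [len(parts[0]), len(parts[1])]
--     last = None
--     while idx[0] < length[0] or idx[1] < length[1]:
--         if (idx[1] >= length[1] or idx[0] < length[0] and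
--                 le(parts[0][idx[0]][0], parts[1][idx[1]][0])):
--             k = 0
--         else:
--             k = 1
--         element = parts[k][idx[k]]
--         idx[k] += 1
--         if element[0] != last:
--             result.append(element)
--             last = element[0]
--
--     return result
-- ===== SOURCE B (Python) =====
-- def superResources(requests):
--     if len(requests) < 2:
--         return requests
--     result = []
--     last = None
--     for element in sorted(requests, key=lambda x: int(x[0])):
--         if element[0] != last:
--             result.append(element)
--             last = element[0]
--     return result
-- ===== Notes on version B (the rewrite author's own statement) =====
-- stated objective: simpler
-- what changed: Replaces the hand-written recursive merge sort with dedup fused into every merge by a single stable library sort (key int(x[0])) followed by one linear dedup pass over the result.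
import Mathlib
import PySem

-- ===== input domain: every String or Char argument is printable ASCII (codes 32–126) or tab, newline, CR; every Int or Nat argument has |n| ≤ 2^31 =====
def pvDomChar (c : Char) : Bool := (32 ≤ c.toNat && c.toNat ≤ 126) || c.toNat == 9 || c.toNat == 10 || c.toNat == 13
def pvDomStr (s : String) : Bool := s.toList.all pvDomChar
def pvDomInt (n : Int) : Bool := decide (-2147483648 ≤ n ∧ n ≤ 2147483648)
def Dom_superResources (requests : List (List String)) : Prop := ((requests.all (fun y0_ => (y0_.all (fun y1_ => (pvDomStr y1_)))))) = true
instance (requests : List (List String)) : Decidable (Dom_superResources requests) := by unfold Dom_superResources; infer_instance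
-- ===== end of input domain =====

-- B replaces A's recursive merge sort with dedup fused into every merge by one stable
-- library sort on the int key followed by a single linear dedup pass (objective: simpler).

-- ===== PORT A =====
-- int(s): PySem.Int.ofStr?; inputs where int() raises (ValueError) or element[0] raises
-- (IndexError, headD "" here) are excluded by Pre_ below, so getD 0 is exact on Pre_.
def kI (s : String) : Int := (PySem.Int.ofStr? s).getD 0
-- element[0] for a request element; exact on Pre_ (empty elements are outside Pre_).
def kS (e : List String) : String := e.headD ""
def kE (e : List String) : Int := kI (kS e)

-- A's merge-with-dedup while loop: the two index/length pairs become the two remaining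
-- suffixes of parts[0]/parts[1]; `last : Option String` is Python's `last` (none = None).
def srMergeLoop : List (List String) → List (List String) → Option String → List (List String)
  | [], [], _ => []
  | [], b :: r, last =>           -- idx0 ≥ len0: k = 1
      if some (kS b) ≠ last then b :: srMergeLoop [] r (some (kS b)) else srMergeLoop [] r last
  | a :: l, [], last =>           -- idx1 ≥ len1: k = 0
      if some (kS a) ≠ last then a :: srMergeLoop l [] (some (kS a)) else srMergeLoop l [] last
  | a :: l, b :: r, last =>       -- both in range: k = 0 iff le(parts[0][idx0][0], parts[1][idx1][0])
      if kE a ≤ kE b then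
        if some (kS a) ≠ last then a :: srMergeLoop l (b :: r) (some (kS a)) else srMergeLoop l (b :: r) last
      else
        if some (kS b) ≠ last then b :: srMergeLoop (a :: l) r (some (kS b)) else srMergeLoop (a :: l) r last
  termination_by l r _ => l.length + r.length

-- requests[0 : len//2] = take (len/2), requests[len//2 : len] = drop (len/2) (nonneg bounds).
def superResources (requests : List (List String)) : List (List String) :=
  if requests.length < 2 then requests
  else
    srMergeLoop (superResources (requests.take (requests.length / 2)))
                (superResources (requests.drop (requests.length / 2))) none
  termination_by requests.length
  decreasing_by
  · simp only [List.length_take]; omega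
  · simp only [List.length_drop]; omega

-- ===== PORT B =====
-- B's single dedup pass: `for element in …: if element[0] != last: append; last = element[0]`.
def ddLoop : List (List String) → Option String → List (List String)
  | [], _ => []
  | e :: t, last =>
      if some (kS e) ≠ last then e :: ddLoop t (some (kS e)) else ddLoop t last

def superResources_alt (requests : List (List String)) : List (List String) :=
  if requests.length < 2 then requests
  else ddLoop (PySem.List.sorted requests (fun e => kE e) false) none

-- ===== PRECONDITION & SPEC =====
-- Pre_ excludes exactly the inputs where A raises: with len(requests) ≥ 2 every element's
-- [0] is fetched (IndexError on an empty element) and passed to int() (ValueError if not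
-- an int literal); an empty element also fails the parse test since int('') raises.
def Pre_superResources (requests : List (List String)) : Prop :=
  requests.length < 2 ∨ ∀ r ∈ requests, (PySem.Int.ofStr? (r.headD "")).isSome = true
instance (requests : List (List String)) : Decidable (Pre_superResources requests) := by
  unfold Pre_superResources; infer_instance
def pvWitness_superResources : List (List String) :=
  [["2", "a"], ["1", "b"], ["01", "c"]]

def Spec_superResources (requests : List (List String)) (out : List (List String)) : Prop := out = superResources_alt requests
instance (requests : List (List String)) (out : List (List String)) : Decidable (Spec_superResources requests out) := by unfold Spec_superResources; infer_instance

-- ===== CLAIM (what is proved, stated in full; the proofs are below) =====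
def Claim_equal_superResources : Prop := ∀ (requests : List (List String)), Dom_superResources requests → Pre_superResources requests → Spec_superResources requests (superResources requests)

-- ===== LEMMAS AND PROOFS =====

-- plain stable merge (no dedup), the reference algorithm for the proofs
def pmerge : List (List String) → List (List String) → List (List String)
  | [], r => r
  | a :: l, [] => a :: l
  | a :: l, b :: r => if kE a ≤ kE b then a :: pmerge l (b :: r) else b :: pmerge (a :: l) r
  termination_by l r => l.length + r.length

def Srt (xs : List (List String)) : Prop := xs.Pairwise (fun a b => kE a ≤ kE b)
def OLe (o : Option String) (xs : List (List String)) : Prop :=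
  ∀ s, o = some s → ∀ x ∈ xs, kI s ≤ kE x
def OLt (o : Option String) (xs : List (List String)) : Prop :=
  ∀ s, o = some s → ∀ x ∈ xs, kI s < kE x
def NIn (o : Option String) (xs : List (List String)) : Prop :=
  ∀ s, o = some s → ∀ x ∈ xs, kS x ≠ s

theorem pmerge_nil (l : List (List String)) : pmerge l [] = l := by
  cases l <;> simp [pmerge]

-- A's fused loop = dedup after plain merge
theorem srMergeLoop_eq (l r : List (List String)) (last : Option String) :
    srMergeLoop l r last = ddLoop (pmerge l r) last := by
  fun_induction srMergeLoop l r last with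
  | case8 a l b r last hlt h ih =>
      simp only [pmerge]
      rw [if_neg hlt]
      simp_all [ddLoop]
  | case9 a l b r last hlt h ih =>
      simp only [pmerge]
      rw [if_neg hlt]
      simp_all [ddLoop]
  | _ => simp_all [pmerge, ddLoop, pmerge_nil]

theorem ddLoop_sublist (m : List (List String)) (o : Option String) :
    (ddLoop m o).Sublist m := by
  induction m generalizing o with
  | nil => simp [ddLoop]
  | cons e t ih =>
      simp only [ddLoop]
      split
      · exact (ih _).cons₂ e
      · exact (ih _).cons e

-- dedup is idempotent when the inner `last` is compatible with the outer one
theorem ddLoop_ddLoop (m : List (List String)) (o last : Option String)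
    (h : o = last ∨ NIn o m) : ddLoop (ddLoop m o) last = ddLoop m last := by
  induction m generalizing o last with
  | nil => simp [ddLoop]
  | cons e t ih =>
      by_cases he : some (kS e) = o
      · -- dropped by the inner pass: then o = last, so the outer pass drops it too
        rcases h with h | h
        · subst h
          simp only [ddLoop, if_neg (by simp [he] : ¬ some (kS e) ≠ o)]
          exact ih _ _ (Or.inl rfl)
        · exact absurd rfl (h _ he.symm e (by simp))
      · -- kept by the inner pass
        simp only [ddLoop, if_pos (by simpa using he : some (kS e) ≠ o)]
        by_cases hl : some (kS e) = last
        · simp only [if_neg (by simp [hl] : ¬ some (kS e) ≠ last)]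
          exact ih _ _ (Or.inl hl)
        · simp only [if_pos (by simpa using hl : some (kS e) ≠ last)]
          rw [ih _ _ (Or.inl rfl)]

-- small unfolding helpers
theorem ddLoop_keep (e : List String) (t : List (List String)) (last : Option String)
    (h : some (kS e) ≠ last) : ddLoop (e :: t) last = e :: ddLoop t (some (kS e)) := by
  simp only [ddLoop]; rw [if_pos h]

theorem ddLoop_drop (e : List String) (t : List (List String)) (last : Option String)
    (h : some (kS e) = last) : ddLoop (e :: t) last = ddLoop t last := by
  simp only [ddLoop]; rw [if_neg (by simp [h])]

theorem pmerge_le (a b : List String) (l r : List (List String)) (h : kE a ≤ kE b) :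
    pmerge (a :: l) (b :: r) = a :: pmerge l (b :: r) := by
  simp only [pmerge]; rw [if_pos h]

theorem pmerge_gt (a b : List String) (l r : List (List String)) (h : ¬ kE a ≤ kE b) :
    pmerge (a :: l) (b :: r) = b :: pmerge (a :: l) r := by
  simp only [pmerge]; rw [if_neg h]

def isort (xs : List (List String)) : List (List String) :=
  PySem.List.sorted xs (fun e => kE e) false

def insK (x : List String) (s : List (List String)) : List (List String) :=
  PySem.List.insertBy (fun a c => decide (kE a < kE c)) x s

theorem insK_nil (x : List String) : insK x [] = [x] := by
  simp [insK, PySem.List.insertBy]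

theorem insK_cons (x a : List String) (s : List (List String)) :
    insK x (a :: s) = if kE x < kE a then x :: a :: s else a :: insK x s := by
  simp only [insK, PySem.List.insertBy]
  by_cases h : kE x < kE a <;> simp [h]

theorem isort_eq (xs : List (List String)) :
    isort xs = xs.foldl (fun acc x => insK x acc) [] := by
  simp only [isort, insK]
  exact PySem.List.sorted_eq_foldl_insertBy xs (fun e => kE e)

-- inserting an element commutes with merging (unconditionally)
theorem insK_pmerge (n : Nat) : ∀ (s t : List (List String)) (x : List String),
    s.length + t.length ≤ n → insK x (pmerge s t) = pmerge s (insK x t) := by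
  induction n with
  | zero =>
      intro s t x h
      cases s with
      | nil => simp [pmerge]
      | cons a s' => simp at h
  | succ n ih =>
      intro s t x h
      cases s with
      | nil => simp [pmerge]
      | cons a s' =>
        cases t with
        | nil =>
            rw [pmerge_nil, insK_nil, insK_cons]
            by_cases hxa : kE x < kE a
            · rw [if_pos hxa, pmerge_gt _ _ _ _ (not_le.mpr hxa), pmerge_nil]
            · rw [if_neg hxa, pmerge_le _ _ _ _ (not_lt.mp hxa)]
              have := ih s' [] x (by simp at h ⊢; omega)
              rw [pmerge_nil, insK_nil] at this
              rw [this]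
        | cons b t' =>
            rw [insK_cons x b t']
            by_cases hxb : kE x < kE b
            · rw [if_pos hxb]
              by_cases hab : kE a ≤ kE b
              · rw [pmerge_le _ _ _ _ hab, insK_cons]
                by_cases hxa : kE x < kE a
                · rw [if_pos hxa, pmerge_gt _ _ _ _ (not_le.mpr hxa), pmerge_le _ _ _ _ hab]
                · rw [if_neg hxa, pmerge_le _ _ _ _ (not_lt.mp hxa),
                      ih s' (b :: t') x (by simp at h ⊢; omega), insK_cons, if_pos hxb]
              · rw [pmerge_gt _ _ _ _ hab, insK_cons, if_pos hxb,
                    pmerge_gt _ _ _ _ (not_le.mpr (lt_trans hxb (not_le.mp hab))),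
                    pmerge_gt _ _ _ _ hab]
            · rw [if_neg hxb]
              by_cases hab : kE a ≤ kE b
              · rw [pmerge_le _ _ _ _ hab, pmerge_le _ _ _ _ hab, insK_cons,
                    if_neg (not_lt.mpr (le_trans hab (not_lt.mp hxb))),
                    ih s' (b :: t') x (by simp at h ⊢; omega), insK_cons, if_neg hxb]
              · rw [pmerge_gt _ _ _ _ hab, pmerge_gt _ _ _ _ hab, insK_cons, if_neg hxb,
                    ih (a :: s') t' x (by simp at h ⊢; omega)]

theorem pmerge_isort (R : List (List String)) : ∀ s : List (List String),
    pmerge s (isort R) = R.foldl (fun acc x => insK x acc) s := by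
  induction R using List.reverseRecOn with
  | nil => intro s; rw [isort_eq]; simp [pmerge_nil]
  | append_singleton R' x ih =>
      intro s
      have hsplit : isort (R' ++ [x]) = insK x (isort R') := by
        rw [isort_eq, isort_eq, List.foldl_append]; rfl
      rw [hsplit, ← insK_pmerge (s.length + (isort R').length) s (isort R') x le_rfl, ih]
      simp

-- invariant restriction helpers
theorem OLe_tail (o : Option String) (x : List String) (xs : List (List String))
    (h : OLe o (x :: xs)) : OLe o xs :=
  fun s hs y hy => h s hs y (List.mem_cons_of_mem _ hy)
theorem OLt_tail (o : Option String) (x : List String) (xs : List (List String))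
    (h : OLt o (x :: xs)) : OLt o xs :=
  fun s hs y hy => h s hs y (List.mem_cons_of_mem _ hy)
theorem OLe_of_le (c : List String) (xs : List (List String))
    (h : ∀ x ∈ xs, kE c ≤ kE x) : OLe (some (kS c)) xs := by
  intro s hs y hy; cases hs; exact h y hy
theorem OLt_of_lt (c : List String) (xs : List (List String))
    (h : ∀ x ∈ xs, kE c < kE x) : OLt (some (kS c)) xs := by
  intro s hs y hy; cases hs; exact h y hy
theorem OLe_none (xs : List (List String)) : OLe none xs := fun _ hs => nomatch hs
theorem OLt_none (xs : List (List String)) : OLt none xs := fun _ hs => nomatch hs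

-- the central commuting lemma: dedup of the merge of dedupped sorted lists
-- = dedup of the merge of the undedupped lists, under the run-time invariant
theorem cm (n : Nat) : ∀ (sL sR : List (List String)) (lL lR last : Option String),
    sL.length + sR.length ≤ n → Srt sL → Srt sR → OLe last sL → OLe last sR →
    (lL = last ∨ NIn lL sL) → (lR = last ∨ NIn lR sR) → OLe lL sR → OLt lR sL →
    ddLoop (pmerge (ddLoop sL lL) (ddLoop sR lR)) last = ddLoop (pmerge sL sR) last := by
  induction n with
  | zero =>
      intro sL sR lL lR last hlen _ _ _ _ _ _ _ _
      cases sL with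
      | nil => simp only [ddLoop, pmerge]; exact ddLoop_ddLoop sR lR last (by assumption)
      | cons a l' => simp at hlen
  | succ n ih =>
      intro sL sR lL lR last hlen hSL hSR hLaL hLaR hCL hCR hDL hDR
      cases sL with
      | nil => simp only [ddLoop, pmerge]; exact ddLoop_ddLoop sR lR last hCR
      | cons a l' =>
        cases sR with
        | nil =>
            rw [show ddLoop ([] : List (List String)) lR = [] from rfl, pmerge_nil, pmerge_nil]
            exact ddLoop_ddLoop (a :: l') lL last hCL
        | cons b r' =>
          have hSL' : Srt l' := (List.pairwise_cons.mp hSL).2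
          have hSR' : Srt r' := (List.pairwise_cons.mp hSR).2
          have memL : ∀ x ∈ a :: l', kE a ≤ kE x := by
            intro x hx
            rcases List.mem_cons.mp hx with rfl | hx
            · exact le_rfl
            · exact (List.pairwise_cons.mp hSL).1 x hx
          have memR : ∀ x ∈ b :: r', kE b ≤ kE x := by
            intro x hx
            rcases List.mem_cons.mp hx with rfl | hx
            · exact le_rfl
            · exact (List.pairwise_cons.mp hSR).1 x hx
          have hlen' : (a :: l').length + (b :: r').length ≤ n + 1 := hlen
          by_cases hab : kE a ≤ kE b
          · -- the undedupped merge takes a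
            have memRa : ∀ x ∈ b :: r', kE a ≤ kE x := fun x hx => le_trans hab (memR x hx)
            by_cases haL : some (kS a) = lL
            · -- a is dropped by the left dedup; then lL = last, so the plain side drops it too
              have hLeq : lL = last :=
                hCL.resolve_right (fun hn => (hn _ haL.symm a (by simp)) rfl)
              rw [ddLoop_drop a l' lL haL, pmerge_le a b l' r' hab,
                  ddLoop_drop a _ last (hLeq ▸ haL)]
              exact ih l' (b :: r') lL lR last (by simp at hlen ⊢; omega) hSL' hSR
                (OLe_tail _ _ _ hLaL) hLaR (Or.inl hLeq) hCR hDL (OLt_tail _ _ _ hDR)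
            · -- a is kept by the left dedup, and the merge of the dedupped lists takes it first
              rw [ddLoop_keep a l' lL haL]
              have hstep : pmerge (a :: ddLoop l' (some (kS a))) (ddLoop (b :: r') lR)
                  = a :: pmerge (ddLoop l' (some (kS a))) (ddLoop (b :: r') lR) := by
                rcases hdd : ddLoop (b :: r') lR with _ | ⟨c, m'⟩
                · rw [pmerge_nil, pmerge_nil]
                · have hc : c ∈ b :: r' := (ddLoop_sublist (b :: r') lR).subset (by rw [hdd]; simp)
                  rw [pmerge_le _ _ _ _ (memRa c hc)]
              rw [hstep, pmerge_le a b l' r' hab]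
              have hCR' : ∀ (lst : Option String), lR = lst ∨ NIn lR (b :: r') := by
                intro lst
                rcases hCR with hq | hq
                · right
                  intro s hs x hx heq
                  have h1 : kI s < kE a := hDR s hs a (by simp)
                  have h2 : kE a ≤ kE x := memRa x hx
                  have h3 : kE x = kI s := by rw [kE, heq]
                  omega
                · exact Or.inr hq
              by_cases hal : some (kS a) = last
              · rw [ddLoop_drop a _ last hal, ddLoop_drop a _ last hal]
                exact ih l' (b :: r') (some (kS a)) lR last (by simp at hlen ⊢; omega) hSL' hSR
                  (OLe_tail _ _ _ hLaL) hLaR (Or.inl hal) hCR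
                  (OLe_of_le a _ memRa) (OLt_tail _ _ _ hDR)
              · rw [ddLoop_keep a _ last hal, ddLoop_keep a _ last hal]
                rw [ih l' (b :: r') (some (kS a)) lR (some (kS a)) (by simp at hlen ⊢; omega)
                  hSL' hSR (OLe_of_le a _ (fun x hx => memL x (List.mem_cons_of_mem _ hx)))
                  (OLe_of_le a _ memRa) (Or.inl rfl) (hCR' _)
                  (OLe_of_le a _ memRa) (OLt_tail _ _ _ hDR)]
          · -- the undedupped merge takes b
            have hba : kE b < kE a := not_le.mp hab
            have memLb : ∀ x ∈ a :: l', kE b < kE x := fun x hx => lt_of_lt_of_le hba (memL x hx)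
            by_cases hbR : some (kS b) = lR
            · have hReq : lR = last :=
                hCR.resolve_right (fun hn => (hn _ hbR.symm b (by simp)) rfl)
              rw [ddLoop_drop b r' lR hbR, pmerge_gt a b l' r' hab,
                  ddLoop_drop b _ last (hReq ▸ hbR)]
              exact ih (a :: l') r' lL lR last (by simp at hlen ⊢; omega) hSL hSR'
                hLaL (OLe_tail _ _ _ hLaR) hCL (Or.inl hReq) (OLe_tail _ _ _ hDL) hDR
            · rw [ddLoop_keep b r' lR hbR]
              have hstep : pmerge (ddLoop (a :: l') lL) (b :: ddLoop r' (some (kS b)))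
                  = b :: pmerge (ddLoop (a :: l') lL) (ddLoop r' (some (kS b))) := by
                rcases hdd : ddLoop (a :: l') lL with _ | ⟨c, m'⟩
                · simp only [pmerge]
                · have hc : c ∈ a :: l' := (ddLoop_sublist (a :: l') lL).subset (by rw [hdd]; simp)
                  rw [pmerge_gt _ _ _ _ (not_le.mpr (memLb c hc))]
              rw [hstep, pmerge_gt a b l' r' hab]
              have hCL' : ∀ (lst : Option String), lL = lst ∨ NIn lL (a :: l') := by
                intro lst
                rcases hCL with hq | hq
                · right
                  intro s hs x hx heq
                  have h1 : kI s ≤ kE b := hDL s hs b (by simp)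
                  have h2 : kE b < kE x := memLb x hx
                  have h3 : kE x = kI s := by rw [kE, heq]
                  omega
                · exact Or.inr hq
              by_cases hbl : some (kS b) = last
              · rw [ddLoop_drop b _ last hbl, ddLoop_drop b _ last hbl]
                exact ih (a :: l') r' lL (some (kS b)) last (by simp at hlen ⊢; omega) hSL hSR'
                  hLaL (OLe_tail _ _ _ hLaR) hCL (Or.inl hbl)
                  (OLe_tail _ _ _ hDL) (OLt_of_lt b _ memLb)
              · rw [ddLoop_keep b _ last hbl, ddLoop_keep b _ last hbl]
                rw [ih (a :: l') r' lL (some (kS b)) (some (kS b)) (by simp at hlen ⊢; omega)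
                  hSL hSR' (OLe_of_le b _ (fun x hx => le_of_lt (memLb x hx)))
                  (OLe_of_le b _ (fun x hx => memR x (List.mem_cons_of_mem _ hx)))
                  (hCL' _) (Or.inl rfl)
                  (OLe_tail _ _ _ hDL) (OLt_of_lt b _ memLb)]

theorem srt_isort (X : List (List String)) : Srt (isort X) :=
  PySem.List.sorted_pairwise X (fun e => kE e)

theorem ddLoop_isort_small (X : List (List String)) (h : X.length < 2) :
    ddLoop (isort X) none = X := by
  match X with
  | [] => rw [isort_eq]; simp [ddLoop]
  | [x] =>
      rw [isort_eq]
      simp only [List.foldl_cons, List.foldl_nil, insK_nil]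
      rw [ddLoop_keep x [] none (by simp)]
      simp [ddLoop]
  | x :: y :: t => simp at h

theorem superResources_eq (l : List (List String)) :
    superResources l = if l.length < 2 then l else ddLoop (isort l) none := by
  fun_induction superResources l with
  | case1 l h => rw [if_pos h]
  | case2 l h ihL ihR =>
      rw [if_neg h]
      set L := l.take (l.length / 2) with hLdef
      set R := l.drop (l.length / 2) with hRdef
      have hL : superResources L = ddLoop (isort L) none := by
        rw [ihL]; split
        · rw [ddLoop_isort_small L (by assumption)]
        · rfl
      have hR : superResources R = ddLoop (isort R) none := by
        rw [ihR]; split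
        · rw [ddLoop_isort_small R (by assumption)]
        · rfl
      rw [hL, hR, srMergeLoop_eq,
        cm ((isort L).length + (isort R).length) (isort L) (isort R) none none none le_rfl
          (srt_isort L) (srt_isort R) (OLe_none _) (OLe_none _) (Or.inl rfl) (Or.inl rfl)
          (OLe_none _) (OLt_none _)]
      congr 1
      rw [pmerge_isort R (isort L), isort_eq L, ← List.foldl_append, ← isort_eq,
        hLdef, hRdef, List.take_append_drop]

-- ===== VERDICT (by name: the statement is the Claim_ definition above) =====
theorem superResources_spec : Claim_equal_superResources := by
  intro requests _ _
  unfold Spec_superResources superResources_alt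
  rw [superResources_eq]
  split
  · rfl
  · rfl
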